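-- pv_equiv track=rewrite | github.com/rayz1065/competitive-programming | advent_of_code/2020/day_11/main.py | nextStep2
-- ===== SOURCE A (Python) =====
-- def inRange(seatMap, r, c):
--     return r >= 0 and c >= 0 and r < len(seatMap) and c < len(seatMap[0])
--
-- def isFreeSeat(seatMap, r, c):
--     return seatMap[r][c] == 'L'
--
-- def isOccupiedSeat(seatMap, r, c):
--     return seatMap[r][c] == '#'
--
-- def countOccVisib(seatMap, r, c):
--     s = 0
--     for i in range(-1, 2):
--         for j in range(-1, 2):
--             if i != 0 or j != 0:
--                 _r, _c, r, c = r, c, r + i, c + j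
--                 while inRange(seatMap, r, c) and seatMap[r][c] == '.':
--                     r+= i
--                     c+= j
--                 if inRange(seatMap, r, c) and isOccupiedSeat(seatMap, r, c):
--                     s+= 1
--                 r, c = _r, _c
--     return s
--
-- def nextStep2(seatMap: list):
--     newMap = []
--     nRows = len(seatMap)
--     nCols = len(seatMap[0])
--     for r in range(nRows):
--         newLine = ''
--         for c in range(nCols):
--             if r == 0 or c == 0 or r == nRows - 1 or c == nCols - 1:
--                 newLine+= '.'
--             elif isFreeSeat(seatMap, r, c) and countOccVisib(seatMap, r, c) == 0:
--                 newLine+= '#'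
--             elif isOccupiedSeat(seatMap, r, c) and countOccVisib(seatMap, r, c) >= 5:
--                 newLine+= 'L'
--             else:
--                 newLine+= seatMap[r][c]
--         newMap.append(newLine)
--
--     return newMap
-- ===== SOURCE B (Python) =====
-- def nextStep2(seatMap: list):
--     # One step of the visibility seating automaton: 8 linear directional sweeps
--     # precompute each cell's visible-neighbor state (derived from an adjacent,
--     # already-computed cell) instead of casting a ray per seat.
--     nRows = len(seatMap)
--     nCols = len(seatMap[0])
--     emptyRow = [False] * nCols
--
--     def fromRow(prev, src, dj):
--         # visibility row adjacent to source row `src` whose visibility row is `prev`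
--         out = []
--         for c in range(nCols):
--             cc = c + dj
--             if 0 <= cc < nCols:
--                 ch = src[cc]
--                 out.append(prev[cc] if ch == '.' else ch == '#')
--             else:
--                 out.append(False)
--         return out
--
--     def vertDown(dj):
--         # directions (-1, dj): sweep top to bottom
--         vis = []
--         prev = emptyRow
--         for src in seatMap:
--             vis.append(prev)
--             prev = fromRow(prev, src, dj)
--         return vis
--
--     def vertUp(dj):
--         # directions (+1, dj): sweep bottom to top
--         vis = []
--         prev = emptyRow
--         for src in reversed(seatMap):
--             vis.append(prev)
--             prev = fromRow(prev, src, dj)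
--         vis.reverse()
--         return vis
--
--     def horizRow(row, dj):
--         # direction (0, dj) within one row: a running carry
--         line = []
--         cur = False
--         cs = range(nCols) if dj == -1 else range(nCols - 1, -1, -1)
--         for c in cs:
--             line.append(cur)
--             ch = row[c]
--             cur = cur if ch == '.' else ch == '#'
--         if dj == 1:
--             line.reverse()
--         return line
--
--     def horiz(dj):
--         return [horizRow(row, dj) for row in seatMap]
--
--     visAll = [vertDown(-1), vertDown(0), vertDown(1), horiz(-1), horiz(1),
--               vertUp(-1), vertUp(0), vertUp(1)]
--
--     newMap = []
--     for r in range(nRows):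
--         line = []
--         for c in range(nCols):
--             if r == 0 or c == 0 or r == nRows - 1 or c == nCols - 1:
--                 line.append('.')
--             else:
--                 ch = seatMap[r][c]
--                 if ch == 'L' or ch == '#':
--                     cnt = sum(1 for v in visAll if v[r][c])
--                     if ch == 'L' and cnt == 0:
--                         line.append('#')
--                     elif ch == '#' and cnt >= 5:
--                         line.append('L')
--                     else:
--                         line.append(ch)
--                 else:
--                     line.append(ch)
--         newMap.append(''.join(line))
--     return newMap
-- ===== Notes on version B (the rewrite author's own statement) =====
-- stated objective: alternative
-- what changed: Instead of casting a ray of up to R+C cells from each seat in each of the 8 directions, B precomputes for every cell and direction whether the first visible non-floor cell is occupied, using 8 linear directional sweeps (top-down/bottom-up row DP for the vertical and diagonal directions, a running carry per row for the horizontal ones), then assembles the next grid from those tables; it visits O(R*C) cells per direction regardless of ray lengths, but was not measured faster on the generated inputs.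
-- outside the precondition, e.g. on nextStep2(['...', '.']): A returns ['...', '...'], B raises IndexError
import Mathlib
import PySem

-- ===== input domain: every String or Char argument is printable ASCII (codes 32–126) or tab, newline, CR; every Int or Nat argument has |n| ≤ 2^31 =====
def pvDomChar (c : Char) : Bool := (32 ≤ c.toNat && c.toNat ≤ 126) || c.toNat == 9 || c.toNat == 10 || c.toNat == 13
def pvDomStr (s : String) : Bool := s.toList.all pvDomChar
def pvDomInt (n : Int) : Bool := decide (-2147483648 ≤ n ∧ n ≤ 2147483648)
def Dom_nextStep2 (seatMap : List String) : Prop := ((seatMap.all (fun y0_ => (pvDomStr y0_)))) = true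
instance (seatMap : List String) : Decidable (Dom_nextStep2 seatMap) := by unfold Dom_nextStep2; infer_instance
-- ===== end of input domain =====

-- B replaces A's per-seat 8-direction ray casting by 8 linear directional sweeps that
-- precompute each cell's first visible non-floor neighbour per direction (alternative algorithm).


-- ===== PORT A =====
-- s[i] for an index the source guarantees in range (the default is never returned inside Pre_)
def gchS (s : String) (i : Int) : Char := (PySem.Str.pyGet? s i).getD '?'

-- seatMap[r][c]
def getCh (g : List String) (r c : Int) : Char := gchS (PySem.List.pyGetD g r "") c

-- len(seatMap[0])
def nColsOf (g : List String) : Int := PySem.Str.len (PySem.List.pyGetD g 0 "")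

def inRangeA (g : List String) (r c : Int) : Bool :=
  decide (0 ≤ r) && decide (0 ≤ c) && decide (r < (g.length : Int)) && decide (c < nColsOf g)

def isFreeSeat (g : List String) (r c : Int) : Bool := getCh g r c == 'L'

def isOccupiedSeat (g : List String) (r c : Int) : Bool := getCh g r c == '#'

-- the 'while inRange and floor' walk of countOccVisib; fuel n+m+2 dominates the loop,
-- which moves monotonically towards a border in at least one coordinate
def walkA (g : List String) (i j : Int) : Nat → Int → Int → Int × Int
  | 0, r, c => (r, c)
  | fuel+1, r, c =>
      if inRangeA g r c && (getCh g r c == '.') then walkA g i j fuel (r + i) (c + j)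
      else (r, c)

def pvFuel (g : List String) : Nat := g.length + (nColsOf g).toNat + 2

-- one direction's contribution inside countOccVisib's double loop
def occVisib (g : List String) (i j r c : Int) : Bool :=
  let p := walkA g i j (pvFuel g) (r + i) (c + j)
  inRangeA g p.1 p.2 && isOccupiedSeat g p.1 p.2

def pvDirs : List (Int × Int) := [(-1,-1),(-1,0),(-1,1),(0,-1),(0,1),(1,-1),(1,0),(1,1)]

def countOccVisib (g : List String) (r c : Int) : Int :=
  pvDirs.foldl (fun s d => if occVisib g d.1 d.2 r c then s + 1 else s) 0

def nextStep2 (seatMap : List String) : List String :=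
  let nRows : Int := seatMap.length
  let nCols : Int := nColsOf seatMap
  (PySem.List.pyRange 0 nRows 1).map (fun r =>
    String.ofList ((PySem.List.pyRange 0 nCols 1).map (fun c =>
      if r == 0 || c == 0 || r == nRows - 1 || c == nCols - 1 then '.'
      else if isFreeSeat seatMap r c && (countOccVisib seatMap r c == 0) then '#'
      else if isOccupiedSeat seatMap r c && decide (5 ≤ countOccVisib seatMap r c) then 'L'
      else getCh seatMap r c)))

-- ===== PORT B =====
-- visibility row adjacent to source row `src` whose visibility row is `prev`
def fromRow (m : Int) (prev : List Bool) (src : String) (dj : Int) : List Bool :=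
  (PySem.List.pyRange 0 m 1).map (fun c =>
    if 0 ≤ c + dj ∧ c + dj < m then
      (if gchS src (c + dj) == '.' then PySem.List.pyGetD prev (c + dj) false
       else gchS src (c + dj) == '#')
    else false)

def sweepAux (m dj : Int) (prev : List Bool) : List String → List (List Bool)
  | [] => []
  | src :: rest => prev :: sweepAux m dj (fromRow m prev src dj) rest

-- directions (-1, dj): sweep top to bottom
def vertDown (g : List String) (m dj : Int) : List (List Bool) :=
  sweepAux m dj (List.replicate m.toNat false) g

-- directions (+1, dj): sweep bottom to top
def vertUp (g : List String) (m dj : Int) : List (List Bool) :=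
  (sweepAux m dj (List.replicate m.toNat false) g.reverse).reverse

def horizAux (row : String) (cur : Bool) : List Int → List Bool
  | [] => []
  | c :: rest =>
      cur :: horizAux row (if gchS row c == '.' then cur else gchS row c == '#') rest

-- direction (0, dj) within one row: a running carry
def horizRow (m dj : Int) (row : String) : List Bool :=
  if dj == -1 then horizAux row false (PySem.List.pyRange 0 m 1)
  else (horizAux row false (PySem.List.pyRange (m - 1) (-1) (-1))).reverse

def horiz (g : List String) (m dj : Int) : List (List Bool) := g.map (horizRow m dj)

-- v[r][c]
def vget (vis : List (List Bool)) (r c : Int) : Bool :=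
  PySem.List.pyGetD (PySem.List.pyGetD vis r []) c false

def nextStep2_alt (seatMap : List String) : List String :=
  let nRows : Int := seatMap.length
  let nCols : Int := nColsOf seatMap
  let visAll : List (List (List Bool)) :=
    [vertDown seatMap nCols (-1), vertDown seatMap nCols 0, vertDown seatMap nCols 1,
     horiz seatMap nCols (-1), horiz seatMap nCols 1,
     vertUp seatMap nCols (-1), vertUp seatMap nCols 0, vertUp seatMap nCols 1]
  (PySem.List.pyRange 0 nRows 1).map (fun r =>
    String.ofList ((PySem.List.pyRange 0 nCols 1).map (fun c =>
      if r == 0 || c == 0 || r == nRows - 1 || c == nCols - 1 then '.'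
      else
        let ch := getCh seatMap r c
        if ch == 'L' || ch == '#' then
          let cnt : Int := visAll.foldl (fun s v => if vget v r c then s + 1 else s) 0
          if ch == 'L' && (cnt == 0) then '#'
          else if ch == '#' && decide (5 ≤ cnt) then 'L'
          else ch
        else ch)))

-- ===== PRECONDITION & SPEC =====
-- Pre_ excludes the empty list (A raises IndexError on seatMap[0]) and ragged grids with a row
-- shorter than the first row, on which A raises IndexError on almost every access pattern and
-- where it happens never to read the short row its value is an accident of that pattern.
def Pre_nextStep2 (seatMap : List String) : Prop :=
  seatMap ≠ [] ∧ ∀ s ∈ seatMap, (seatMap.headD "").length ≤ s.length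
instance (seatMap : List String) : Decidable (Pre_nextStep2 seatMap) := by
  unfold Pre_nextStep2; infer_instance

def pvWitness_nextStep2 : List String := ["....", ".LL.", "...."]

def Spec_nextStep2 (seatMap : List String) (out : List String) : Prop := out = nextStep2_alt seatMap
instance (seatMap : List String) (out : List String) : Decidable (Spec_nextStep2 seatMap out) := by unfold Spec_nextStep2; infer_instance

-- ===== CLAIM (what is proved, stated in full; the proofs are below) =====
def Claim_equal_nextStep2 : Prop := ∀ (seatMap : List String), Dom_nextStep2 seatMap → Pre_nextStep2 seatMap → Spec_nextStep2 seatMap (nextStep2 seatMap)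

-- ===== LEMMAS AND PROOFS =====

-- the visibility row of row r for direction (i, j): what B's tables must contain
def specRow (g : List String) (i j r : Int) : List Bool :=
  (PySem.List.pyRange 0 (nColsOf g) 1).map (fun c => occVisib g i j r c)

theorem m_nonneg (g : List String) : 0 ≤ nColsOf g := by
  simp [nColsOf, PySem.Str.len_eq]

theorem inRange_iff (g : List String) (r c : Int) :
    inRangeA g r c = true ↔ 0 ≤ r ∧ 0 ≤ c ∧ r < (g.length : Int) ∧ c < nColsOf g := by
  simp [inRangeA]; tauto

-- remaining-iteration bound for the while loop of direction (i, j)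
def walkMeasure (g : List String) (i j r c : Int) : Nat :=
  (if i = 1 then (g.length : Int) - r else if i = -1 then r + 1
   else if j = 1 then nColsOf g - c else c + 1).toNat

theorem walk_stable (g : List String) (i j : Int)
    (hi : i = -1 ∨ i = 0 ∨ i = 1) (hj : j = -1 ∨ j = 0 ∨ j = 1) (hij : ¬(i = 0 ∧ j = 0)) :
    ∀ (k : Nat) (r c : Int), walkMeasure g i j r c ≤ k →
      walkA g i j (k+1) r c = walkA g i j k r c := by
  intro k
  induction k with
  | zero =>
    intro r c h
    by_cases hg : (inRangeA g r c && (getCh g r c == '.')) = true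
    · exfalso
      have hin : inRangeA g r c = true := by rw [Bool.and_eq_true] at hg; exact hg.1
      have hb := (inRange_iff g r c).mp hin
      have hm := m_nonneg g
      unfold walkMeasure at h
      rcases hi with rfl|rfl|rfl <;> rcases hj with rfl|rfl|rfl <;>
        first
          | exact absurd ⟨rfl, rfl⟩ hij
          | (norm_num at h; omega)
    · have hg' : (inRangeA g r c && (getCh g r c == '.')) = false := by
        revert hg; cases (inRangeA g r c && (getCh g r c == '.')) <;> simp
      simp [walkA, hg']
  | succ k ih =>
    intro r c h
    by_cases hg : (inRangeA g r c && (getCh g r c == '.')) = true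
    · have hin : inRangeA g r c = true := by rw [Bool.and_eq_true] at hg; exact hg.1
      have hb := (inRange_iff g r c).mp hin
      have hm := m_nonneg g
      simp only [walkA, hg, if_true]
      apply ih
      unfold walkMeasure at h ⊢
      rcases hi with rfl|rfl|rfl <;> rcases hj with rfl|rfl|rfl <;>
        first
          | exact absurd ⟨rfl, rfl⟩ hij
          | (norm_num at h ⊢; omega)
    · have hg' : (inRangeA g r c && (getCh g r c == '.')) = false := by
        revert hg; cases (inRangeA g r c && (getCh g r c == '.')) <;> simp
      simp [walkA, hg']

theorem walk_fuel (g : List String) (i j : Int)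
    (hi : i = -1 ∨ i = 0 ∨ i = 1) (hj : j = -1 ∨ j = 0 ∨ j = 1) (hij : ¬(i = 0 ∧ j = 0))
    (k k' : Nat) (r c : Int) (hm : walkMeasure g i j r c ≤ k) (hkk : k ≤ k') :
    walkA g i j k' r c = walkA g i j k r c := by
  induction k', hkk using Nat.le_induction with
  | base => rfl
  | succ k' hkk ih =>
      rw [walk_stable g i j hi hj hij k' r c (le_trans hm hkk), ih]

theorem occ_step (g : List String) (i j : Int)
    (hi : i = -1 ∨ i = 0 ∨ i = 1) (hj : j = -1 ∨ j = 0 ∨ j = 1) (hij : ¬(i = 0 ∧ j = 0))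
    (r c : Int) :
    occVisib g i j r c =
      if inRangeA g (r+i) (c+j) then
        (if getCh g (r+i) (c+j) == '.' then occVisib g i j (r+i) (c+j)
         else getCh g (r+i) (c+j) == '#')
      else false := by
  have hm := m_nonneg g
  by_cases hin : inRangeA g (r+i) (c+j) = true
  · have hb := (inRange_iff g (r+i) (c+j)).mp hin
    by_cases hfl : (getCh g (r+i) (c+j) == '.') = true
    · -- the walk takes at least one step
      have h1 : walkA g i j (pvFuel g) (r+i) (c+j)
          = walkA g i j (g.length + (nColsOf g).toNat + 1) (r+i+i) (c+j+j) := by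
        show walkA g i j (g.length + (nColsOf g).toNat + 1 + 1) (r+i) (c+j) = _
        simp only [walkA]
        rw [if_pos]
        rw [Bool.and_eq_true]
        exact ⟨hin, hfl⟩
      have h2 : walkA g i j (pvFuel g) (r+i+i) (c+j+j)
          = walkA g i j (g.length + (nColsOf g).toNat + 1) (r+i+i) (c+j+j) := by
        apply walk_fuel g i j hi hj hij
        · unfold walkMeasure
          rcases hi with rfl|rfl|rfl <;> rcases hj with rfl|rfl|rfl <;>
            first
              | exact absurd ⟨rfl, rfl⟩ hij
              | (norm_num; omega)
        · exact Nat.le_succ _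
      rw [if_pos hin, if_pos hfl]
      simp only [occVisib, h1, h2]
    · -- first cell in the direction is not floor: the walk stops immediately
      have hg' : (inRangeA g (r+i) (c+j) && (getCh g (r+i) (c+j) == '.')) = false := by
        simp [hfl]
      have h0 : walkA g i j (pvFuel g) (r+i) (c+j) = (r+i, c+j) := by
        show walkA g i j (g.length + (nColsOf g).toNat + 1 + 1) (r+i) (c+j) = _
        simp [walkA, hg']
      rw [if_pos hin, if_neg hfl]
      simp [occVisib, h0, hin, isOccupiedSeat]
  · -- out of range: the walk stops immediately and the check fails
    have hin' : inRangeA g (r+i) (c+j) = false := by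
      revert hin; cases inRangeA g (r+i) (c+j) <;> simp
    have hg' : (inRangeA g (r+i) (c+j) && (getCh g (r+i) (c+j) == '.')) = false := by
      simp [hin']
    have h0 : walkA g i j (pvFuel g) (r+i) (c+j) = (r+i, c+j) := by
      show walkA g i j (g.length + (nColsOf g).toNat + 1 + 1) (r+i) (c+j) = _
      simp [walkA, hg']
    rw [if_neg hin]
    simp [occVisib, h0, hin']

theorem fromRow_spec_down (g : List String) (dj : Int)
    (hj : dj = -1 ∨ dj = 0 ∨ dj = 1) (r : Int) (hr0 : 0 ≤ r) (hrn : r < (g.length : Int)) :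
    fromRow (nColsOf g) (specRow g (-1) dj r) (PySem.List.pyGetD g r "") dj
      = specRow g (-1) dj (r + 1) := by
  unfold fromRow specRow
  apply List.map_congr_left
  intro c hc
  rw [PySem.List.mem_pyRange_one] at hc
  have hstep := occ_step g (-1) dj (by tauto) hj (by simp) (r+1) c
  have hr1 : r + 1 + -1 = r := by ring
  rw [hr1] at hstep
  rw [hstep]
  by_cases hcc : 0 ≤ c + dj ∧ c + dj < nColsOf g
  · rw [if_pos hcc, if_pos ((inRange_iff g r (c+dj)).mpr ⟨hr0, hcc.1, hrn, hcc.2⟩)]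
    rw [PySem.List.pyGetD_map_pyRange_of_nonneg _ _ _ _ hcc.1 hcc.2]
    simp only [getCh]
  · rw [if_neg hcc, if_neg (by intro h; exact hcc ⟨((inRange_iff g r (c+dj)).mp h).2.1,
      ((inRange_iff g r (c+dj)).mp h).2.2.2⟩)]

theorem fromRow_spec_up (g : List String) (dj : Int)
    (hj : dj = -1 ∨ dj = 0 ∨ dj = 1) (r : Int) (hr0 : 0 ≤ r) (hrn : r < (g.length : Int)) :
    fromRow (nColsOf g) (specRow g 1 dj r) (PySem.List.pyGetD g r "") dj
      = specRow g 1 dj (r - 1) := by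
  unfold fromRow specRow
  apply List.map_congr_left
  intro c hc
  rw [PySem.List.mem_pyRange_one] at hc
  have hstep := occ_step g 1 dj (by tauto) hj (by simp) (r-1) c
  have hr1 : r - 1 + 1 = r := by ring
  rw [hr1] at hstep
  rw [hstep]
  by_cases hcc : 0 ≤ c + dj ∧ c + dj < nColsOf g
  · rw [if_pos hcc, if_pos ((inRange_iff g r (c+dj)).mpr ⟨hr0, hcc.1, hrn, hcc.2⟩)]
    rw [PySem.List.pyGetD_map_pyRange_of_nonneg _ _ _ _ hcc.1 hcc.2]
    simp only [getCh]
  · rw [if_neg hcc, if_neg (by intro h; exact hcc ⟨((inRange_iff g r (c+dj)).mp h).2.1,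
      ((inRange_iff g r (c+dj)).mp h).2.2.2⟩)]

theorem sweepAux_abs (m dj : Int) :
    ∀ (t : List String) (rowOf : Nat → List Bool),
      (∀ (k : Nat) (hk : k < t.length), fromRow m (rowOf k) t[k] dj = rowOf (k+1)) →
      sweepAux m dj (rowOf 0) t = (List.range t.length).map rowOf := by
  intro t
  induction t with
  | nil => intro rowOf _; simp [sweepAux]
  | cons s rest ih =>
      intro rowOf h
      have h0 : fromRow m (rowOf 0) s dj = rowOf 1 := h 0 (by simp)
      simp only [sweepAux, h0]
      rw [ih (fun k => rowOf (k+1)) (fun k hk => by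
        have := h (k+1) (by simpa using Nat.succ_lt_succ hk)
        simpa using this)]
      simp [List.range_succ_eq_map, Function.comp_def]

theorem specRow_top (g : List String) (dj : Int) (hj : dj = -1 ∨ dj = 0 ∨ dj = 1) :
    specRow g (-1) dj 0 = List.replicate (nColsOf g).toNat false := by
  unfold specRow
  rw [List.eq_replicate_iff]
  refine ⟨by simp [PySem.List.length_pyRange_one], ?_⟩
  intro b hb
  simp only [List.mem_map] at hb
  obtain ⟨c, hc, rfl⟩ := hb
  rw [occ_step g (-1) dj (by tauto) hj (by simp)]
  rw [if_neg (by intro h; have := ((inRange_iff g _ _).mp h).1; omega)]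

theorem specRow_bot (g : List String) (dj : Int) (hj : dj = -1 ∨ dj = 0 ∨ dj = 1) :
    specRow g 1 dj ((g.length : Int) - 1) = List.replicate (nColsOf g).toNat false := by
  unfold specRow
  rw [List.eq_replicate_iff]
  refine ⟨by simp [PySem.List.length_pyRange_one], ?_⟩
  intro b hb
  simp only [List.mem_map] at hb
  obtain ⟨c, hc, rfl⟩ := hb
  rw [occ_step g 1 dj (by tauto) hj (by simp)]
  rw [if_neg (by intro h; have := ((inRange_iff g _ _).mp h).2.2.1; omega)]

theorem vertDown_spec (g : List String) (dj : Int) (hj : dj = -1 ∨ dj = 0 ∨ dj = 1) :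
    vertDown g (nColsOf g) dj
      = (List.range g.length).map (fun (k : Nat) => specRow g (-1) dj (k : Int)) := by
  unfold vertDown
  rw [← specRow_top g dj hj]
  have h := sweepAux_abs (nColsOf g) dj g (fun k => specRow g (-1) dj (k : Int)) ?_
  · exact h
  · intro k hk
    have hp : PySem.List.pyGetD g ((k : Nat) : Int) "" = g[k] := by
      rw [PySem.List.pyGetD_natCast]
      exact List.getD_eq_getElem g "" hk
    have := fromRow_spec_down g dj hj (k : Int) (by omega) (by exact_mod_cast hk)
    rw [hp] at this
    rw [this]
    norm_num

theorem vertUp_spec (g : List String) (dj : Int) (hj : dj = -1 ∨ dj = 0 ∨ dj = 1) :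
    vertUp g (nColsOf g) dj
      = ((List.range g.length).map
          (fun (k : Nat) => specRow g 1 dj ((g.length : Int) - 1 - (k : Int)))).reverse := by
  unfold vertUp
  rw [← specRow_bot g dj hj]
  have h := sweepAux_abs (nColsOf g) dj g.reverse
      (fun k => specRow g 1 dj ((g.length : Int) - 1 - (k : Int))) ?_
  · norm_num at h
    rw [h]
  · intro k hk
    rw [List.length_reverse] at hk
    have hrev : g.reverse[k]'(by simpa using hk) = g[g.length - 1 - k] := by
      rw [List.getElem_reverse]
    have hp : PySem.List.pyGetD g ((g.length : Int) - 1 - (k : Int)) ""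
        = g[g.length - 1 - k]'(by omega) := by
      rw [PySem.List.pyGetD_eq_getElem g "" (by omega) (by omega)]
      congr 1
      omega
    have := fromRow_spec_up g dj hj ((g.length : Int) - 1 - (k : Int)) (by omega)
      (by omega)
    rw [hp] at this
    rw [hrev, this]
    congr 1
    push_cast
    ring

theorem occ_left_zero (g : List String) (r : Int) :
    occVisib g 0 (-1) r 0 = false := by
  rw [occ_step g 0 (-1) (by tauto) (by tauto) (by simp)]
  rw [if_neg (by intro h; have := ((inRange_iff g _ _).mp h).2.1; omega)]

theorem occ_right_last (g : List String) (r : Int) :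
    occVisib g 0 1 r (nColsOf g - 1) = false := by
  rw [occ_step g 0 1 (by tauto) (by tauto) (by simp)]
  rw [if_neg (by intro h; have := ((inRange_iff g _ _).mp h).2.2.2; omega)]

theorem horizAux_left (g : List String) (r : Int) (hr0 : 0 ≤ r) (hrn : r < (g.length : Int)) :
    ∀ (n' : Nat) (a : Int), 0 ≤ a → (nColsOf g - a).toNat ≤ n' →
      horizAux (PySem.List.pyGetD g r "") (occVisib g 0 (-1) r a) (PySem.List.pyRange a (nColsOf g) 1)
        = (PySem.List.pyRange a (nColsOf g) 1).map (fun c => occVisib g 0 (-1) r c) := by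
  intro n'
  induction n' with
  | zero =>
      intro a _ hle
      rw [PySem.List.pyRange_one_eq_nil (by omega)]
      rfl
  | succ n' ih =>
      intro a ha hle
      by_cases ham : nColsOf g ≤ a
      · rw [PySem.List.pyRange_one_eq_nil ham]; rfl
      · rw [not_le] at ham
        rw [PySem.List.pyRange_one_cons (by omega)]
        simp only [horizAux, List.map_cons]
        congr 1
        have hupd : (if gchS (PySem.List.pyGetD g r "") a == '.' then occVisib g 0 (-1) r a
            else gchS (PySem.List.pyGetD g r "") a == '#') = occVisib g 0 (-1) r (a + 1) := by
          rw [occ_step g 0 (-1) (by tauto) (by tauto) (by simp) r (a+1)]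
          have e1 : r + (0:Int) = r := by ring
          have e2 : a + 1 + -1 = a := by ring
          rw [e1, e2]
          rw [if_pos ((inRange_iff g r a).mpr ⟨hr0, ha, hrn, ham⟩)]
          simp only [getCh]
        rw [hupd]
        exact ih (a+1) (by omega) (by omega)

theorem horizAux_right (g : List String) (r : Int) (hr0 : 0 ≤ r) (hrn : r < (g.length : Int)) :
    ∀ (n' : Nat) (a : Int), a < nColsOf g → (a + 1).toNat ≤ n' →
      horizAux (PySem.List.pyGetD g r "") (occVisib g 0 1 r a) (PySem.List.pyRange a (-1) (-1))
        = (PySem.List.pyRange a (-1) (-1)).map (fun c => occVisib g 0 1 r c) := by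
  intro n'
  induction n' with
  | zero =>
      intro a _ hle
      rw [PySem.List.pyRange_neg_one_eq_nil (by omega)]
      rfl
  | succ n' ih =>
      intro a ham hle
      by_cases ha : a ≤ -1
      · rw [PySem.List.pyRange_neg_one_eq_nil (by omega)]; rfl
      · rw [not_le] at ha
        rw [PySem.List.pyRange_neg_one_cons (by omega)]
        simp only [horizAux, List.map_cons]
        congr 1
        have hupd : (if gchS (PySem.List.pyGetD g r "") a == '.' then occVisib g 0 1 r a
            else gchS (PySem.List.pyGetD g r "") a == '#') = occVisib g 0 1 r (a - 1) := by
          rw [occ_step g 0 1 (by tauto) (by tauto) (by simp) r (a-1)]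
          have e1 : r + (0:Int) = r := by ring
          have e2 : a - 1 + 1 = a := by ring
          rw [e1, e2]
          rw [if_pos ((inRange_iff g r a).mpr ⟨hr0, by omega, hrn, ham⟩)]
          simp only [getCh]
        rw [hupd]
        exact ih (a-1) (by omega) (by omega)

theorem horizRow_left (g : List String) (r : Int) (hr0 : 0 ≤ r) (hrn : r < (g.length : Int)) :
    horizRow (nColsOf g) (-1) (PySem.List.pyGetD g r "") = specRow g 0 (-1) r := by
  unfold horizRow specRow
  rw [if_pos (by decide)]
  rw [← occ_left_zero g r]
  exact horizAux_left g r hr0 hrn ((nColsOf g).toNat) 0 le_rfl (by omega)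

theorem horizRow_right (g : List String) (r : Int) (hr0 : 0 ≤ r) (hrn : r < (g.length : Int)) :
    horizRow (nColsOf g) 1 (PySem.List.pyGetD g r "") = specRow g 0 1 r := by
  unfold horizRow specRow
  rw [if_neg (by decide)]
  rw [← occ_right_last g r]
  rw [horizAux_right g r hr0 hrn (nColsOf g - 1 + 1).toNat (nColsOf g - 1) (by omega) le_rfl]
  rw [PySem.List.pyRange_neg_one_eq_reverse]
  rw [show ((-1 : Int) + 1) = 0 by norm_num, show (nColsOf g - 1 + 1) = nColsOf g by ring]
  rw [List.map_reverse, List.reverse_reverse]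

theorem vget_vertDown (g : List String) (dj : Int) (hj : dj = -1 ∨ dj = 0 ∨ dj = 1)
    (r c : Int) (hr0 : 0 ≤ r) (hrn : r < (g.length : Int)) (hc0 : 0 ≤ c) (hcm : c < nColsOf g) :
    vget (vertDown g (nColsOf g) dj) r c = occVisib g (-1) dj r c := by
  unfold vget
  rw [vertDown_spec g dj hj]
  rw [PySem.List.pyGetD_eq_getElem _ []
    hr0 (by rw [List.length_map, List.length_range]; exact hrn)]
  rw [List.getElem_map, List.getElem_range]
  rw [Int.toNat_of_nonneg hr0]
  unfold specRow
  rw [PySem.List.pyGetD_map_pyRange_of_nonneg _ _ _ _ hc0 hcm]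

theorem vget_vertUp (g : List String) (dj : Int) (hj : dj = -1 ∨ dj = 0 ∨ dj = 1)
    (r c : Int) (hr0 : 0 ≤ r) (hrn : r < (g.length : Int)) (hc0 : 0 ≤ c) (hcm : c < nColsOf g) :
    vget (vertUp g (nColsOf g) dj) r c = occVisib g 1 dj r c := by
  unfold vget
  rw [vertUp_spec g dj hj]
  rw [PySem.List.pyGetD_eq_getElem _ []
    hr0 (by rw [List.length_reverse, List.length_map, List.length_range]; exact hrn)]
  rw [List.getElem_reverse, List.getElem_map, List.getElem_range]
  simp only [List.length_map, List.length_range]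
  rw [show ((g.length : Int) - 1 - ((g.length - 1 - r.toNat : Nat) : Int)) = r from by omega]
  unfold specRow
  rw [PySem.List.pyGetD_map_pyRange_of_nonneg _ _ _ _ hc0 hcm]

theorem vget_horizL (g : List String) (r c : Int)
    (hr0 : 0 ≤ r) (hrn : r < (g.length : Int)) (hc0 : 0 ≤ c) (hcm : c < nColsOf g) :
    vget (horiz g (nColsOf g) (-1)) r c = occVisib g 0 (-1) r c := by
  unfold vget horiz
  rw [PySem.List.pyGetD_eq_getElem _ [] hr0 (by rw [List.length_map]; exact hrn)]
  rw [List.getElem_map]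
  rw [show g[r.toNat]'(by omega) = PySem.List.pyGetD g r "" from
    (PySem.List.pyGetD_eq_getElem g "" hr0 hrn).symm]
  rw [horizRow_left g r hr0 hrn]
  unfold specRow
  rw [PySem.List.pyGetD_map_pyRange_of_nonneg _ _ _ _ hc0 hcm]

theorem vget_horizR (g : List String) (r c : Int)
    (hr0 : 0 ≤ r) (hrn : r < (g.length : Int)) (hc0 : 0 ≤ c) (hcm : c < nColsOf g) :
    vget (horiz g (nColsOf g) 1) r c = occVisib g 0 1 r c := by
  unfold vget horiz
  rw [PySem.List.pyGetD_eq_getElem _ [] hr0 (by rw [List.length_map]; exact hrn)]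
  rw [List.getElem_map]
  rw [show g[r.toNat]'(by omega) = PySem.List.pyGetD g r "" from
    (PySem.List.pyGetD_eq_getElem g "" hr0 hrn).symm]
  rw [horizRow_right g r hr0 hrn]
  unfold specRow
  rw [PySem.List.pyGetD_map_pyRange_of_nonneg _ _ _ _ hc0 hcm]

theorem cnt_eq (g : List String) (r c : Int)
    (hr0 : 0 ≤ r) (hrn : r < (g.length : Int)) (hc0 : 0 ≤ c) (hcm : c < nColsOf g) :
    List.foldl (fun s v => if vget v r c then s + 1 else s) (0 : Int)
      [vertDown g (nColsOf g) (-1), vertDown g (nColsOf g) 0, vertDown g (nColsOf g) 1,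
       horiz g (nColsOf g) (-1), horiz g (nColsOf g) 1,
       vertUp g (nColsOf g) (-1), vertUp g (nColsOf g) 0, vertUp g (nColsOf g) 1]
      = countOccVisib g r c := by
  have d1 := vget_vertDown g (-1) (by tauto) r c hr0 hrn hc0 hcm
  have d2 := vget_vertDown g 0 (by tauto) r c hr0 hrn hc0 hcm
  have d3 := vget_vertDown g 1 (by tauto) r c hr0 hrn hc0 hcm
  have h1 := vget_horizL g r c hr0 hrn hc0 hcm
  have h2 := vget_horizR g r c hr0 hrn hc0 hcm
  have u1 := vget_vertUp g (-1) (by tauto) r c hr0 hrn hc0 hcm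
  have u2 := vget_vertUp g 0 (by tauto) r c hr0 hrn hc0 hcm
  have u3 := vget_vertUp g 1 (by tauto) r c hr0 hrn hc0 hcm
  simp only [countOccVisib, pvDirs, List.foldl, d1, d2, d3, h1, h2, u1, u2, u3]

-- ===== VERDICT (by name: the statement is the Claim_ definition above) =====
theorem nextStep2_spec : Claim_equal_nextStep2 := by
  unfold Claim_equal_nextStep2
  intro g _ _
  unfold Spec_nextStep2
  simp only [nextStep2, nextStep2_alt]
  apply List.map_congr_left
  intro r hr
  rw [PySem.List.mem_pyRange_one] at hr
  congr 1
  apply List.map_congr_left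
  intro c hc
  rw [PySem.List.mem_pyRange_one] at hc
  by_cases hb : (r == 0 || c == 0 || r == (g.length : Int) - 1 || c == nColsOf g - 1) = true
  · rw [if_pos hb, if_pos hb]
  · rw [if_neg hb, if_neg hb]
    rw [cnt_eq g r c hr.1 hr.2 hc.1 hc.2]
    by_cases hL : getCh g r c = 'L'
    · simp [isFreeSeat, isOccupiedSeat, hL]
    · by_cases hH : getCh g r c = '#'
      · simp [isFreeSeat, isOccupiedSeat, hH]
      · simp [isFreeSeat, isOccupiedSeat, hL, hH]
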